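-- pv_equiv track=rewrite | github.com/jnewbery/aoc | sols/202303.py | get_number_locations
-- ===== SOURCE A (Python) =====
-- from typing import Optional, Iterable
--
-- DIGITS = [str(i) for i in range(10)]
--
-- def get_number_locations(line: str) -> Iterable[tuple[int, set[int]]]:
--     """Return a stream of (number, (row, col)) tuples."""
--     # Tracks the current number and its starting location
--     current_number: Optional[tuple[int, set[int]]] = None
--
--     for i, c in enumerate(line):
--         if current_number is None and c in DIGITS:
--             current_number = (int(c), {max(i-1, 0), i})
--         elif current_number is not None and c in DIGITS:
--             current_number = (current_number[0] * 10 + int(c), current_number[1] | {i})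
--         elif current_number is not None and c not in DIGITS:
--             yield (current_number[0], current_number[1] | {i})
--             current_number = None
--
--     if current_number is not None:
--         yield (current_number[0], current_number[1])
-- ===== SOURCE B (Python) =====
-- def get_number_locations(line):
--     """Return a stream of (number, (row, col)) tuples."""
--     n = len(line)
--     i = 0
--     while i < n:
--         if '0' <= line[i] <= '9':
--             num = 0
--             j = i
--             while j < n and '0' <= line[j] <= '9':
--                 num = num * 10 + (ord(line[j]) - 48)
--                 j += 1
--             yield (num, set(range(max(i - 1, 0), min(j + 1, n))))
--             i = j + 1
--         else:
--             i += 1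
-- ===== Notes on version B (the rewrite author's own statement) =====
-- stated objective: alternative
-- what changed: Replaced A's per-character Optional-state machine that grows the column set by repeated set unions with an index-jumping scan over maximal digit runs that accumulates each number in an inner loop and emits its whole column span as one range(max(start-1,0), min(end+1, len(line))).
import Mathlib
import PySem

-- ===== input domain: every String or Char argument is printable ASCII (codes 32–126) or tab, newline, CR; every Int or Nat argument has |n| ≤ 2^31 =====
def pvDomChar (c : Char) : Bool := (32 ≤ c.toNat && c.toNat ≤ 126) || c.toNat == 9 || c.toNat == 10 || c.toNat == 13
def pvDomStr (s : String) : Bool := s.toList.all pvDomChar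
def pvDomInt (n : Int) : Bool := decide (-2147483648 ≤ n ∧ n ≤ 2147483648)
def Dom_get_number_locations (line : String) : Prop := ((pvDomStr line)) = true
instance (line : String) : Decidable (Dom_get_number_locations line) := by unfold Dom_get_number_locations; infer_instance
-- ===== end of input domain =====

-- B replaces A's per-character number/set accumulator state machine by an index-jumping scan
-- over maximal digit runs that builds each column span as one range (objective: simpler).

-- ===== PORT A =====
-- DIGITS = [str(i) for i in range(10)]; Python holds the ten one-character digit strings, so the
-- membership test `c in DIGITS` on the enumerated character is exactly membership in this char list.
def pvDigitsA : List Char := ['0', '1', '2', '3', '4', '5', '6', '7', '8', '9']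

-- int(c) for the single character c (always guarded by `c in DIGITS` in A)
def pvIntOfDigit (c : Char) : Int := (PySem.Int.ofChars? [c]).getD 0

-- the `for i, c in enumerate(line)` loop of A, carrying `current_number`; the trailing
-- `if current_number is not None: yield …` is the `[], some` case
def goA : List Char → Int → Option (Int × List Int) → List (Int × List Int)
  | [], _, none => []
  | [], _, some cur => [cur]
  | c :: cs, i, none =>
      if c ∈ pvDigitsA then
        goA cs (i + 1) (some (pvIntOfDigit c, PySem.Set.ofList [max (i - 1) 0, i]))
      else
        goA cs (i + 1) none
  | c :: cs, i, some (n, s) =>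
      if c ∈ pvDigitsA then
        goA cs (i + 1) (some (n * 10 + pvIntOfDigit c, PySem.Set.union s [i]))
      else
        (n, PySem.Set.union s [i]) :: goA cs (i + 1) none

def get_number_locations (line : String) : List (Int × List Int) :=
  goA line.toList 0 none

-- ===== PORT B =====
def pvIsDig (c : Char) : Bool := decide ('0' ≤ c) && decide (c ≤ '9')

-- num = num * 10 + (ord(line[j]) - 48)
def pvStep (a : Int) (d : Char) : Int := a * 10 + ((d.toNat : Int) - 48)

-- B's outer while loop; `run` is the maximal digit run line[i:j] found by the inner while loop,
-- `num` its accumulated value, and i jumps to j+1 (drop the run and its terminating character)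
def goB : List Char → Int → Int → List (Int × List Int)
  | [], _, _ => []
  | c :: cs, i, n =>
      if pvIsDig c then
        let run := c :: cs.takeWhile pvIsDig
        let j := i + run.length
        (run.foldl pvStep 0,
          PySem.List.pyRange (max (i - 1) 0) (min (j + 1) n) 1)
          :: goB (cs.drop run.length) (j + 1) n
      else
        goB cs (i + 1) n
  termination_by cs _ _ => cs.length
  decreasing_by
    · simp only [List.length_drop, List.length_cons]
      omega
    · exact Nat.lt_succ_self _

def get_number_locations_alt (line : String) : List (Int × List Int) :=
  goB line.toList 0 (line.toList.length : Int)

-- ===== PRECONDITION & SPEC =====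
def Spec_get_number_locations (line : String) (out : List (Int × List Int)) : Prop := out = get_number_locations_alt line
instance (line : String) (out : List (Int × List Int)) : Decidable (Spec_get_number_locations line out) := by unfold Spec_get_number_locations; infer_instance

-- ===== CLAIM (what is proved, stated in full; the proofs are below) =====
def Claim_equal_get_number_locations : Prop := ∀ (line : String), Dom_get_number_locations line → Spec_get_number_locations line (get_number_locations line)

-- ===== LEMMAS AND PROOFS =====

lemma mem_digits_iff (c : Char) : c ∈ pvDigitsA ↔ pvIsDig c = true := by
  constructor
  · intro h
    fin_cases h <;> decide
  · intro h
    simp only [pvIsDig, Bool.and_eq_true, decide_eq_true_eq] at h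
    have h1 : 48 ≤ c.toNat := Nat.succ_le_of_lt h.1
    have h2 : c.toNat ≤ 57 := h.2
    have hc : c.toNat = 48 ∨ c.toNat = 49 ∨ c.toNat = 50 ∨ c.toNat = 51 ∨ c.toNat = 52 ∨
        c.toNat = 53 ∨ c.toNat = 54 ∨ c.toNat = 55 ∨ c.toNat = 56 ∨ c.toNat = 57 := by omega
    have hofn := (Char.ofNat_toNat c).symm
    rcases hc with hc|hc|hc|hc|hc|hc|hc|hc|hc|hc <;> (rw [hc] at hofn; rw [hofn]; decide)

lemma intOfDigit_eq (c : Char) (h : pvIsDig c = true) :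
    pvIntOfDigit c = (c.toNat : Int) - 48 := by
  have h' : c ∈ pvDigitsA := (mem_digits_iff c).mpr h
  fin_cases h' <;> decide

lemma union_pyRange (m i : Int) (h : m ≤ i) :
    PySem.Set.union (PySem.List.pyRange m i 1) [i] = PySem.List.pyRange m (i + 1) 1 := by
  have hx : (i : Int) ∉ PySem.List.pyRange m i 1 := by
    simp [PySem.List.mem_pyRange_one]
  rw [PySem.List.pyRange_one_succ_right h]
  simp [PySem.Set.union, PySem.Set.update, PySem.Set.add, PySem.Set.contains, hx]

lemma ofList_init (i : Int) (h : 0 ≤ i) :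
    PySem.Set.ofList [max (i - 1) 0, i] = PySem.List.pyRange (max (i - 1) 0) (i + 1) 1 := by
  rcases eq_or_lt_of_le h with h0 | h0
  · rw [← h0]; decide
  · have hmax : max (i - 1) 0 = i - 1 := by omega
    rw [hmax, PySem.List.pyRange_one_cons (by omega : (i - 1 : Int) < i + 1)]
    have h1 : i - 1 + 1 = i := by omega
    rw [h1, PySem.List.pyRange_one_singleton]
    simp [PySem.Set.ofList, PySem.Set.add, PySem.Set.contains, PySem.Set.empty]
    omega

lemma goA_run (ds : List Char) : ∀ (i m n : Int), 0 ≤ m → m < i →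
    goA ds i (some (n, PySem.List.pyRange m i 1)) =
      ((ds.takeWhile pvIsDig).foldl pvStep n,
        PySem.List.pyRange m
          (i + ((ds.takeWhile pvIsDig).length : Int) +
            (if ds.takeWhile pvIsDig = ds then 0 else 1)) 1)
        :: goA (ds.drop ((ds.takeWhile pvIsDig).length + 1))
            (i + ((ds.takeWhile pvIsDig).length : Int) + 1) none := by
  induction ds with
  | nil =>
    intro i m n h0 h1
    simp [goA]
  | cons d ds ih =>
    intro i m n h0 h1
    by_cases hd : pvIsDig d = true
    · have hmem : d ∈ pvDigitsA := (mem_digits_iff d).mpr hd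
      have hstep : goA (d :: ds) i (some (n, PySem.List.pyRange m i 1)) =
          goA ds (i + 1) (some (n * 10 + pvIntOfDigit d,
            PySem.Set.union (PySem.List.pyRange m i 1) [i])) := by
        simp [goA, hmem]
      rw [hstep, union_pyRange m i (le_of_lt h1), intOfDigit_eq d hd,
        ih (i + 1) m (n * 10 + ((d.toNat : Int) - 48)) h0 (by omega)]
      simp only [List.takeWhile_cons, hd, if_true, List.foldl_cons, List.length_cons,
        List.drop_succ_cons, List.cons.injEq, Prod.mk.injEq, true_and]
      refine ⟨⟨by simp [pvStep], ?_⟩, ?_⟩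
      · congr 1
        split_ifs with h <;> push_cast <;> ring
      · have hidx : i + (((ds.takeWhile pvIsDig).length + 1 : Nat) : Int) + 1 =
            (i + 1) + ((ds.takeWhile pvIsDig).length : Int) + 1 := by push_cast; ring
        rw [hidx]
    · have hmem : d ∉ pvDigitsA := fun hm => hd ((mem_digits_iff d).mp hm)
      have hstep : goA (d :: ds) i (some (n, PySem.List.pyRange m i 1)) =
          (n, PySem.Set.union (PySem.List.pyRange m i 1) [i]) :: goA ds (i + 1) none := by
        simp [goA, hmem]
      rw [hstep, union_pyRange m i (le_of_lt h1)]
      have htk : (d :: ds).takeWhile pvIsDig = [] := by simp [hd]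
      simp [htk]

lemma main_loop : ∀ (L : Nat) (cs : List Char) (i n : Int), cs.length ≤ L → 0 ≤ i →
    n = i + (cs.length : Int) → goA cs i none = goB cs i n := by
  intro L
  induction L with
  | zero =>
    intro cs i n hL h0 hn
    have hnil : cs = [] := List.eq_nil_of_length_eq_zero (Nat.le_zero.mp hL)
    subst hnil
    simp [goA, goB.eq_def]
  | succ L ih =>
    intro cs i n hL h0 hn
    cases cs with
    | nil => simp [goA, goB.eq_def]
    | cons c cs =>
      simp only [List.length_cons] at hL hn
      by_cases hd : pvIsDig c = true
      · have hmem : c ∈ pvDigitsA := (mem_digits_iff c).mpr hd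
        have hA1 : goA (c :: cs) i none =
            goA cs (i + 1) (some (pvIntOfDigit c, PySem.Set.ofList [max (i - 1) 0, i])) := by
          simp [goA, hmem]
        have hM0 : (0 : Int) ≤ max (i - 1) 0 := le_max_right _ _
        have hMi : max (i - 1) 0 < i + 1 := by omega
        rw [hA1, ofList_init i h0, goA_run cs (i + 1) (max (i - 1) 0) (pvIntOfDigit c) hM0 hMi]
        have hB1 : goB (c :: cs) i n =
            ((c :: cs.takeWhile pvIsDig).foldl pvStep 0,
              PySem.List.pyRange (max (i - 1) 0)
                (min (i + ((c :: cs.takeWhile pvIsDig).length : Int) + 1) n) 1)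
              :: goB (cs.drop ((cs.takeWhile pvIsDig).length + 1))
                  (i + ((c :: cs.takeWhile pvIsDig).length : Int) + 1) n := by
          rw [goB.eq_def]
          simp [hd]
        rw [hB1]
        have hval : (c :: cs.takeWhile pvIsDig).foldl pvStep 0 =
            (cs.takeWhile pvIsDig).foldl pvStep (pvIntOfDigit c) := by
          rw [List.foldl_cons, intOfDigit_eq c hd]
          norm_num [pvStep]
        rw [hval]
        have hpre : (cs.takeWhile pvIsDig) <+: cs := List.takeWhile_prefix pvIsDig
        have hKlen : (cs.takeWhile pvIsDig).length ≤ cs.length := hpre.length_le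
        simp only [List.length_cons, List.cons.injEq, Prod.mk.injEq, true_and]
        by_cases hEq : cs.takeWhile pvIsDig = cs
        · have hlen : (cs.takeWhile pvIsDig).length = cs.length := by rw [hEq]
          have hdropA : cs.drop ((cs.takeWhile pvIsDig).length + 1) = [] :=
            List.drop_eq_nil_of_le (by omega)
          have hdropB : cs.drop ((cs.takeWhile pvIsDig).length + 1) = [] :=
            List.drop_eq_nil_of_le (by omega)
          rw [hdropA]
          refine ⟨?_, by simp [goA, goB.eq_def]⟩
          congr 1
          rw [if_pos hEq]
          omega
        · have hlt : (cs.takeWhile pvIsDig).length < cs.length :=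
            lt_of_le_of_ne hKlen (fun h => hEq (hpre.eq_of_length h))
          refine ⟨?_, ?_⟩
          · congr 1
            rw [if_neg hEq]
            omega
          · have hidx : i + ((((cs.takeWhile pvIsDig).length + 1 : Nat)) : Int) + 1 =
                (i + 1) + ((cs.takeWhile pvIsDig).length : Int) + 1 := by push_cast; ring
            rw [hidx]
            apply ih
            · rw [List.length_drop]; omega
            · omega
            · rw [List.length_drop]; omega
      · have hmem : c ∉ pvDigitsA := fun hm => hd ((mem_digits_iff c).mp hm)
        have hA1 : goA (c :: cs) i none = goA cs (i + 1) none := by simp [goA, hmem]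
        have hB1 : goB (c :: cs) i n = goB cs (i + 1) n := by
          rw [goB.eq_def]
          simp [hd]
        rw [hA1, hB1]
        exact ih cs (i + 1) n (by omega) (by omega) (by omega)

-- ===== VERDICT (by name: the statement is the Claim_ definition above) =====
theorem get_number_locations_spec : Claim_equal_get_number_locations := by
  intro line _
  unfold Spec_get_number_locations get_number_locations get_number_locations_alt
  exact main_loop line.toList.length line.toList 0 _ le_rfl le_rfl (by ring)
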